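-- pv_equiv track=rewrite | github.com/Alsstudy/Jeongyeon | Lv.5/n68938.py | solution
-- ===== SOURCE A (Python) =====
-- def solution(s):
--     answer = 0
--     for i in range(len(s)):
--         for j in range(i, len(s)):
--             n1 = i
--             m1 = j
--             n2 = i
--             m2 = j
--             sol1 = 0
--             sol2 = 0
--             while n1 <= m1 and n2 <= m2:
--                 if s[n1] != s[m1]:
--                     sol1 = m1 - n1
--                     break
--                 else:
--                     m1 -= 1
--                 if s[n2] != s[m2]:
--                     sol2 = m2 - n2
--                     break
--                 else:
--                     n2 += 1
--             answer += max(sol1, sol2)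
--     return answer
-- ===== SOURCE B (Python) =====
-- def solution(s):
--     n = len(s)
--     # nxt[i]: smallest k > i with s[k] != s[i] (n if none)
--     nxt = [n] * n
--     for i in range(n - 2, -1, -1):
--         nxt[i] = i + 1 if s[i + 1] != s[i] else nxt[i + 1]
--     # prv[j]: largest k < j with s[k] != s[j] (-1 if none)
--     prv = [-1] * n
--     for j in range(1, n):
--         prv[j] = j - 1 if s[j - 1] != s[j] else prv[j - 1]
--     answer = 0
--     for i in range(n):
--         for j in range(i, n):
--             if s[i] != s[j]:
--                 answer += j - i
--             elif nxt[i] <= j: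
--                 answer += max(prv[j] - i, j - nxt[i])
--     return answer
-- ===== Notes on version B (the rewrite author's own statement) =====
-- stated objective: faster
-- what changed: Replaces the per-substring two-pointer while loop by O(1) lookups into two O(n) precomputed arrays (nearest differing character to the right of i and to the left of j), turning O(n^3) worst case into O(n^2).
import Mathlib
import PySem

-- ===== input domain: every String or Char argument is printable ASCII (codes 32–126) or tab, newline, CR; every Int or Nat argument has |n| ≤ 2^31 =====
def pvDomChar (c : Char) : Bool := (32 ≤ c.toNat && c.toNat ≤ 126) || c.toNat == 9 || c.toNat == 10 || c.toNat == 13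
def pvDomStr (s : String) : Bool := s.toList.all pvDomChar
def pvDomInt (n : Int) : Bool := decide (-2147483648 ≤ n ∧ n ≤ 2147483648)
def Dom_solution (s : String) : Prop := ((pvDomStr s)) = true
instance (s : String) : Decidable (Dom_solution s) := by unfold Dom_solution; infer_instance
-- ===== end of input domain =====

-- B replaces A's per-substring two-pointer while loop by O(1) lookups into the
-- "nearest differing character" recurrences (right of i / left of j): O(n^3) → O(n^2).

-- ===== PORT A =====
-- the inner 'while n1 <= m1 and n2 <= m2' loop of A (n1 and m2 stay fixed;
-- all indices accessed are in range, so getD is exact for Python s[k])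
def loopA (l : List Char) (n1 m1 n2 m2 : Nat) : Int :=
  if h : n1 ≤ m1 ∧ n2 ≤ m2 then
    if l.getD n1 ' ' ≠ l.getD m1 ' ' then max ((m1 : Int) - n1) 0
    else if l.getD n2 ' ' ≠ l.getD m2 ' ' then max 0 ((m2 : Int) - n2)
    else loopA l n1 (m1 - 1) (n2 + 1) m2
  else 0
termination_by m2 + 1 - n2
decreasing_by omega

def solution (s : String) : Int :=
  let l := s.toList
  (List.range l.length).foldl (fun acc i =>
    (List.range' i (l.length - i)).foldl (fun acc2 j => acc2 + loopA l i j i j) acc) 0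

-- ===== PORT B =====
-- nxt[i] of Source B: smallest k > i with s[k] != s[i], or n (same recurrence as Source B's
-- right-to-left fill, realised per index)
def nxtB (l : List Char) (i : Nat) : Nat :=
  if h : i + 1 < l.length then
    if l.getD (i + 1) ' ' ≠ l.getD i ' ' then i + 1 else nxtB l (i + 1)
  else l.length
termination_by l.length - i

-- prv[j] of Source B: largest k < j with s[k] != s[j], or -1
def prvB (l : List Char) (j : Nat) : Int :=
  if j = 0 then -1
  else if l.getD (j - 1) ' ' ≠ l.getD j ' ' then (j : Int) - 1 else prvB l (j - 1)

def solution_alt (s : String) : Int :=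
  let l := s.toList
  (List.range l.length).foldl (fun acc i =>
    (List.range' i (l.length - i)).foldl (fun acc2 j =>
      if l.getD i ' ' ≠ l.getD j ' ' then acc2 + ((j : Int) - i)
      else if nxtB l i ≤ j then acc2 + max (prvB l j - i) ((j : Int) - nxtB l i)
      else acc2) acc) 0

-- ===== PRECONDITION & SPEC =====
def Spec_solution (s : String) (out : Int) : Prop := out = solution_alt s
instance (s : String) (out : Int) : Decidable (Spec_solution s out) := by unfold Spec_solution; infer_instance

-- ===== CLAIM (what is proved, stated in full; the proofs are below) =====
def Claim_equal_solution : Prop := ∀ (s : String), Dom_solution s → Spec_solution s (solution s)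

-- ===== LEMMAS AND PROOFS =====

-- the per-pair value B adds for the substring s[i..j]
def pairB (l : List Char) (i j : Nat) : Int :=
  if l.getD i ' ' ≠ l.getD j ' ' then (j : Int) - i
  else if nxtB l i ≤ j then max (prvB l j - i) ((j : Int) - nxtB l i)
  else 0

-- characterisation of nxtB
lemma nxtB_le_len (l : List Char) : ∀ (n i : Nat), l.length - i ≤ n → nxtB l i ≤ l.length := by
  intro n
  induction n with
  | zero => intro i hn; unfold nxtB; split_ifs <;> omega
  | succ n ih =>
      intro i hn
      unfold nxtB
      split_ifs with h1 h2
      · omega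
      · exact ih (i + 1) (by omega)
      · omega

lemma nxtB_gt_aux (l : List Char) : ∀ (n i : Nat), l.length - i ≤ n → i < l.length →
    i < nxtB l i := by
  intro n
  induction n with
  | zero => intro i hn hi; omega
  | succ n ih =>
      intro i hn hi
      unfold nxtB
      split_ifs with h1 h2
      · omega
      · have := ih (i + 1) (by omega) h1; omega
      · omega

lemma nxtB_gt (l : List Char) (i : Nat) (hi : i < l.length) : i < nxtB l i :=
  nxtB_gt_aux l (l.length - i) i le_rfl hi

lemma nxtB_between_aux (l : List Char) : ∀ (n i k : Nat), l.length - i ≤ n → i < k →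
    k < nxtB l i → l.getD k ' ' = l.getD i ' ' := by
  intro n
  induction n with
  | zero =>
      intro i k hn h1 h2
      have := nxtB_le_len l 0 i hn
      omega
  | succ n ih =>
      intro i k hn h1 h2
      unfold nxtB at h2
      split_ifs at h2 with hlen heq
      · omega
      · rcases Nat.lt_or_ge (i + 1) k with hk | hk
        · rw [ih (i + 1) k (by omega) hk h2]
          exact not_not.mp heq
        · have hk1 : k = i + 1 := by omega
          rw [hk1]; exact not_not.mp heq
      · have := nxtB_le_len l (n + 1) i hn
        omega

lemma nxtB_between (l : List Char) (i k : Nat) (h1 : i < k) (h2 : k < nxtB l i) :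
    l.getD k ' ' = l.getD i ' ' :=
  nxtB_between_aux l (l.length - i) i k le_rfl h1 h2

lemma nxtB_diff_aux (l : List Char) : ∀ (n i : Nat), l.length - i ≤ n → nxtB l i < l.length →
    l.getD (nxtB l i) ' ' ≠ l.getD i ' ' := by
  intro n
  induction n with
  | zero =>
      intro i hn h
      unfold nxtB at h
      split_ifs at h <;> omega
  | succ n ih =>
      intro i hn h
      unfold nxtB at h ⊢
      split_ifs at h ⊢ with hlen heq
      · exact heq
      · have heq' := not_not.mp heq
        intro hc
        exact ih (i + 1) (by omega) h (by rw [hc]; exact heq'.symm)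
      · omega

lemma nxtB_diff (l : List Char) (i : Nat) (h : nxtB l i < l.length) :
    l.getD (nxtB l i) ' ' ≠ l.getD i ' ' :=
  nxtB_diff_aux l (l.length - i) i le_rfl h

-- derived bounds
lemma nxtB_le_of (l : List Char) (i k : Nat) (h1 : i < k)
    (h2 : l.getD k ' ' ≠ l.getD i ' ') : nxtB l i ≤ k := by
  by_contra h
  exact h2 (nxtB_between l i k h1 (by omega))

lemma nxtB_ge_of (l : List Char) (i p : Nat) (hi : i < l.length) (hp : p ≤ l.length)
    (h : ∀ k, i < k → k < p → l.getD k ' ' = l.getD i ' ') : p ≤ nxtB l i := by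
  by_contra hc
  have h1 := nxtB_gt l i hi
  have h2 := nxtB_diff l i (by omega)
  exact h2 (h _ h1 (by omega))

-- characterisation of prvB
lemma prvB_zero (l : List Char) : prvB l 0 = -1 := by unfold prvB; rfl

lemma prvB_succ (l : List Char) (j : Nat) :
    prvB l (j + 1) = if l.getD j ' ' ≠ l.getD (j + 1) ' ' then (j : Int) else prvB l j := by
  conv_lhs => unfold prvB
  simp only [Nat.succ_ne_zero, if_false, Nat.add_sub_cancel]
  split_ifs with h
  · push_cast; ring
  · rfl

lemma prvB_lt (l : List Char) (j : Nat) : prvB l j < (j : Int) := by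
  induction j with
  | zero => rw [prvB_zero]; simp
  | succ j ih =>
      rw [prvB_succ]
      split_ifs with h
      · push_cast; omega
      · push_cast; omega

lemma prvB_ge_neg_one (l : List Char) (j : Nat) : -1 ≤ prvB l j := by
  induction j with
  | zero => rw [prvB_zero]
  | succ j ih =>
      rw [prvB_succ]
      split_ifs with h
      · omega
      · exact ih

lemma prvB_between (l : List Char) (j : Nat) : ∀ (k : Nat), prvB l j < (k : Int) → k < j →
    l.getD k ' ' = l.getD j ' ' := by
  induction j with
  | zero => intro k h1 h2; omega
  | succ j ih =>
      intro k h1 h2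
      rw [prvB_succ] at h1
      split_ifs at h1 with heq
      · omega
      · have heq' := not_not.mp heq
        rcases Nat.lt_or_ge k j with hk | hk
        · rw [ih k h1 hk]; exact heq'
        · have hkj : k = j := by omega
          rw [hkj]; exact heq'

lemma prvB_diff (l : List Char) (j : Nat) (h : 0 ≤ prvB l j) :
    l.getD (prvB l j).toNat ' ' ≠ l.getD j ' ' := by
  induction j with
  | zero => rw [prvB_zero] at h; omega
  | succ j ih =>
      rw [prvB_succ] at h ⊢
      split_ifs at h ⊢ with heq
      · simpa using heq
      · have heq' := not_not.mp heq
        intro hc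
        exact ih h (by rw [hc]; exact heq'.symm)

lemma prvB_eq_of (l : List Char) (j p : Nat) (h1 : p < j)
    (h2 : l.getD p ' ' ≠ l.getD j ' ')
    (h3 : ∀ k, p < k → k < j → l.getD k ' ' = l.getD j ' ') : prvB l j = (p : Int) := by
  have hlt := prvB_lt l j
  have hge := prvB_ge_neg_one l j
  rcases lt_trichotomy (prvB l j) (p : Int) with h | h | h
  · exact absurd (prvB_between l j p h h1) h2
  · exact h
  · have h0 : 0 ≤ prvB l j := by omega
    have hk : (prvB l j).toNat < j := by omega
    have := h3 (prvB l j).toNat (by omega) hk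
    exact absurd this (prvB_diff l j h0)

-- the central loop characterisation: after t clean steps, A's loop computes pairB
lemma loop_char (d : Nat) : ∀ (l : List Char) (i j t : Nat), i ≤ j → j < l.length →
    i + t + d = j + 1 →
    (∀ u, u < t → l.getD (j - u) ' ' = l.getD i ' ' ∧ l.getD (i + u) ' ' = l.getD j ' ') →
    loopA l i (j - t) (i + t) j = pairB l i j := by
  induction d with
  | zero =>
      intro l i j t hij hj hd hcl
      unfold loopA
      rw [dif_neg (by omega)]
      have hcij : l.getD i ' ' = l.getD j ' ' := by
        simpa using (hcl 0 (by omega)).2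
      have hn : j + 1 ≤ nxtB l i :=
        nxtB_ge_of l i (j + 1) (by omega) (by omega) (fun k hk1 hk2 => by
          have h2 := (hcl (k - i) (by omega)).2
          have hk : i + (k - i) = k := by omega
          rw [hk] at h2
          rw [h2, ← hcij])
      unfold pairB
      rw [if_neg (not_not.mpr hcij), if_neg (by omega)]
  | succ d ih =>
      intro l i j t hij hj hd hcl
      unfold loopA
      rw [dif_pos (by omega : i ≤ j - t ∧ i + t ≤ j)]
      by_cases hne1 : l.getD i ' ' ≠ l.getD (j - t) ' '
      · rw [if_pos hne1]
        rcases Nat.eq_zero_or_pos t with ht0 | ht1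
        · subst ht0
          simp only [Nat.sub_zero] at hne1 ⊢
          unfold pairB
          rw [if_pos hne1, max_eq_left (by omega)]
        · have hcij : l.getD i ' ' = l.getD j ' ' := by
            simpa using (hcl 0 (by omega)).2
          have hd2 : i < j - t := by
            rcases Nat.lt_or_ge i (j - t) with h | h
            · exact h
            · have he : j - t = i := by omega
              rw [he] at hne1
              exact absurd rfl hne1
          have hnle : nxtB l i ≤ j - t := nxtB_le_of l i (j - t) hd2 (Ne.symm hne1)
          have hnge : i + t ≤ nxtB l i :=
            nxtB_ge_of l i (i + t) (by omega) (by omega) (fun k hk1 hk2 => by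
              have h2 := (hcl (k - i) (by omega)).2
              have hk : i + (k - i) = k := by omega
              rw [hk] at h2
              rw [h2, ← hcij])
          have hprv : prvB l j = ((j - t : Nat) : Int) :=
            prvB_eq_of l j (j - t) (by omega)
              (by rw [← hcij]; exact Ne.symm hne1)
              (fun k hk1 hk2 => by
                have h1 := (hcl (j - k) (by omega)).1
                have hk : j - (j - k) = k := by omega
                rw [hk] at h1
                rw [h1, hcij])
          unfold pairB
          rw [if_neg (not_not.mpr hcij), if_pos (by omega), hprv,
            max_eq_left (by omega), max_eq_left (by omega)]
      · rw [if_neg hne1]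
        have hne1' := not_not.mp hne1
        by_cases hne2 : l.getD (i + t) ' ' ≠ l.getD j ' '
        · rw [if_pos hne2]
          rcases Nat.eq_zero_or_pos t with ht0 | ht1
          · subst ht0
            simp only [Nat.sub_zero] at hne1'
            simp only [Nat.add_zero] at hne2
            exact absurd hne1' hne2
          · have hcij : l.getD i ' ' = l.getD j ' ' := by
              simpa using (hcl 0 (by omega)).2
            have hnle : nxtB l i ≤ i + t :=
              nxtB_le_of l i (i + t) (by omega) (fun hx => hne2 (hx.trans hcij))
            have hnge : i + t ≤ nxtB l i :=
              nxtB_ge_of l i (i + t) (by omega) (by omega) (fun k hk1 hk2 => by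
                have h2 := (hcl (k - i) (by omega)).2
                have hk : i + (k - i) = k := by omega
                rw [hk] at h2
                rw [h2, ← hcij])
            have hn : nxtB l i = i + t := le_antisymm hnle hnge
            have hprv : prvB l j < (j : Int) - t := by
              by_contra hp
              push Not at hp
              have h0 : (0 : Int) ≤ prvB l j := by omega
              have hlt := prvB_lt l j
              have hdf := prvB_diff l j h0
              have hpc : ((prvB l j).toNat : Int) = prvB l j := Int.toNat_of_nonneg h0
              apply hdf
              rcases Nat.lt_or_ge (j - (prvB l j).toNat) t with h | h
              · have h1 := (hcl (j - (prvB l j).toNat) h).1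
                have hk : j - (j - (prvB l j).toNat) = (prvB l j).toNat := by omega
                rw [hk] at h1
                rw [h1, hcij]
              · have hpt : (prvB l j).toNat = j - t := by omega
                rw [hpt, ← hne1', hcij]
            unfold pairB
            rw [if_neg (not_not.mpr hcij), if_pos (by omega), hn,
              max_eq_right (by omega), max_eq_right (by omega)]
        · rw [if_neg hne2]
          have hrw1 : j - t - 1 = j - (t + 1) := by omega
          rw [hrw1]
          exact ih l i j (t + 1) hij hj (by omega) (fun u hu => by
            rcases Nat.lt_or_ge u t with h | h
            · exact hcl u h
            · have hu' : u = t := by omega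
              subst hu'
              exact ⟨hne1'.symm, not_not.mp hne2⟩)

lemma pair_eq (l : List Char) (i j : Nat) (hij : i ≤ j) (hj : j < l.length) :
    loopA l i j i j = pairB l i j := by
  have := loop_char (j + 1 - i) l i j 0 hij hj (by omega) (by intro u hu; omega)
  simpa using this

-- ===== VERDICT (by name: the statement is the Claim_ definition above) =====
theorem solution_spec : Claim_equal_solution := by
  intro s _
  unfold Spec_solution solution solution_alt
  apply PySem.List.foldl_congr_mem
  intro acc i hi
  apply PySem.List.foldl_congr_mem
  intro acc2 j hj
  have hi' : i < s.toList.length := List.mem_range.mp hi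
  have hj' : i ≤ j ∧ j < s.toList.length := by
    have := List.mem_range'_1.mp hj
    omega
  rw [pair_eq s.toList i j hj'.1 hj'.2]
  unfold pairB
  split_ifs <;> simp
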